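-- pv_equiv track=rewrite | github.com/christophersanborn/HTLCProductsSim | HTLCProductsSim.py | validSymbol
-- ===== SOURCE A (Python) =====
-- def validSymbol(symbol):
--     if not isinstance(symbol, str):
--         return False
--     if len(symbol) == 0:
--         return False
--     ok = "QWERTYUIOPASDFGHJKLZXCVBNM."
--     if not all(c in ok for c in symbol):
--         return False
--     return True
-- ===== SOURCE B (Python) =====
-- import re
--
-- _SYMBOL_RE = re.compile(r"[A-Z.]+")
--
-- def validSymbol(symbol):
--     if not isinstance(symbol, str):
--         return False
--     return bool(_SYMBOL_RE.fullmatch(symbol))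
-- ===== Notes on version B (the rewrite author's own statement) =====
-- stated objective: idiomatic
-- what changed: Replaces the explicit empty-length check and per-character membership scan over the scrambled 27-character constant with one precompiled regex fullmatch of [A-Z.]+, whose + quantifier also rejects the empty string.
import Mathlib
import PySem

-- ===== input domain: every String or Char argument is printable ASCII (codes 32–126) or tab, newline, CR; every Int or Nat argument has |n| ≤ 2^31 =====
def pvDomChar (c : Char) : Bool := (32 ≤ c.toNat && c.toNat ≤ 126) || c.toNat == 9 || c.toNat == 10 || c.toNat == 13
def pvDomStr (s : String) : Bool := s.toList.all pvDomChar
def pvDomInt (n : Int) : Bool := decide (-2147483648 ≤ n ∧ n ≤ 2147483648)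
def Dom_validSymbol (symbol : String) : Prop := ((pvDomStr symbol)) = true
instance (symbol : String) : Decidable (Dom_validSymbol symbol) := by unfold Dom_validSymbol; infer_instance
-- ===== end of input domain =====

-- B replaces A's empty-string check plus per-character membership scan over a scrambled
-- 27-character constant by a single regex fullmatch of [A-Z.]+ (idiomatic; same cost).

-- ===== PORT A =====
-- the constant ok = "QWERTYUIOPASDFGHJKLZXCVBNM." as its character list
def okChars : List Char := "QWERTYUIOPASDFGHJKLZXCVBNM.".toList

def validSymbol (symbol : String) : Bool :=
  if symbol.toList.length = 0 then false
  else if !(symbol.toList.all (fun c => okChars.contains c)) then false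
  else true

-- ===== PORT B =====
-- regex fullmatch of [A-Z.]+ : every char in the class [A-Z.], and at least one char
def classAZdot (c : Char) : Bool := (65 ≤ c.toNat && c.toNat ≤ 90) || c == '.'

def validSymbol_alt (symbol : String) : Bool :=
  !symbol.toList.isEmpty && symbol.toList.all classAZdot

-- ===== PRECONDITION & SPEC =====
def Spec_validSymbol (symbol : String) (out : Bool) : Prop := out = validSymbol_alt symbol
instance (symbol : String) (out : Bool) : Decidable (Spec_validSymbol symbol out) := by unfold Spec_validSymbol; infer_instance

-- ===== CLAIM (what is proved, stated in full; the proofs are below) =====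
def Claim_equal_validSymbol : Prop := ∀ (symbol : String), Dom_validSymbol symbol → Spec_validSymbol symbol (validSymbol symbol)

-- ===== LEMMAS AND PROOFS =====

-- the scrambled constant contains exactly the class [A-Z.]
theorem contains_ok_eq_class (c : Char) : okChars.contains c = classAZdot c := by
  have hok : okChars = ['Q','W','E','R','T','Y','U','I','O','P','A','S','D','F','G','H','J','K','L','Z','X','C','V','B','N','M','.'] := by decide
  rcases c with ⟨⟨⟨n, hn⟩⟩⟩
  rw [Bool.eq_iff_iff, hok]
  simp [classAZdot, Char.ext_iff, UInt32.ext_iff, Char.toNat]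
  omega

-- ===== VERDICT (by name: the statement is the Claim_ definition above) =====
theorem validSymbol_spec : Claim_equal_validSymbol := by
  intro symbol _
  unfold Spec_validSymbol validSymbol validSymbol_alt
  rw [show (fun c => okChars.contains c) = classAZdot from funext contains_ok_eq_class]
  cases symbol.toList with
  | nil => rfl
  | cons a l =>
    rw [Bool.eq_iff_iff]
    simp [List.all_eq_true]
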